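-- pv_equiv track=rewrite | github.com/gaspardpetit/verbatim | verbatim/eval/diarization_utils.py | create_diarized_text
-- ===== SOURCE A (Python) =====
-- from collections.abc import Sequence
--
-- def create_diarized_text(
--     word_labels: Sequence[str],
--     speaker_labels: Sequence[str],
--     use_new_line: bool = False,
--     speaker_prefix: str = "<speaker:",
--     speaker_suffix: str = ">",
-- ) -> str:
--     """Create diarized text from words and speaker labels."""
--     output = []
--     previous_speaker = None
--     for word, speaker in zip(word_labels, speaker_labels):
--         if speaker != previous_speaker:
--             if previous_speaker and use_new_line:
--                 output.append("\n")
--             output.append(speaker_prefix + speaker + speaker_suffix)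
--         output.append(word)
--         previous_speaker = speaker
--     return " ".join(output)
-- ===== SOURCE B (Python) =====
-- from itertools import groupby
--
--
-- def create_diarized_text(
--     word_labels,
--     speaker_labels,
--     use_new_line=False,
--     speaker_prefix="<speaker:",
--     speaker_suffix=">",
-- ):
--     """Create diarized text from words and speaker labels."""
--     output = []
--     previous_speaker = None
--     for speaker, run in groupby(zip(word_labels, speaker_labels), key=lambda p: p[1]):
--         if previous_speaker and use_new_line:
--             output.append("\n")
--         output.append(speaker_prefix + speaker + speaker_suffix)
--         output.extend(word for word, _ in run)
--         previous_speaker = speaker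
--     return " ".join(output)
-- ===== Notes on version B (the rewrite author's own statement) =====
-- stated objective: idiomatic
-- what changed: B groups the zipped (word, speaker) pairs into consecutive same-speaker runs with itertools.groupby and emits one header (plus optional newline) per run, instead of A's per-word loop that compares each speaker to the previous one.
import Mathlib
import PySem

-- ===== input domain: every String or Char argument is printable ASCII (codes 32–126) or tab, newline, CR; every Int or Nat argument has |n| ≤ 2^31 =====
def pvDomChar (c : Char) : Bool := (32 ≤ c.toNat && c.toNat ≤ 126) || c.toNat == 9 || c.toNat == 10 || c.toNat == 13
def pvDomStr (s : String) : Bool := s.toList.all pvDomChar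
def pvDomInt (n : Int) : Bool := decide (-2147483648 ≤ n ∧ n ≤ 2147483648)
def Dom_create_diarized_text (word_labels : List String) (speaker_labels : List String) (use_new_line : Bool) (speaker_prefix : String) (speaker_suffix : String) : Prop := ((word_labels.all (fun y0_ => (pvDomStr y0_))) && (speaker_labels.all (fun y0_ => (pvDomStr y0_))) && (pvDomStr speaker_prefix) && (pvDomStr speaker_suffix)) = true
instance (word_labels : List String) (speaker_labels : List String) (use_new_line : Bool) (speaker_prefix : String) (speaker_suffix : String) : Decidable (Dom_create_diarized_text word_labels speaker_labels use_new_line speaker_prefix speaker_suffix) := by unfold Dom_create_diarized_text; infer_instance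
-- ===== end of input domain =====

-- B replaces A's per-word previous-speaker comparison by grouping the zipped pairs into
-- consecutive same-speaker runs (itertools.groupby) and emitting one header per run (idiomatic).

-- Python truthiness of `previous_speaker` (None or empty string are falsy); used by both ports.
def pvTruthy : Option String → Bool
  | none => false
  | some s => s ≠ ""

-- ===== PORT A =====
-- one iteration of A's for-loop: state = (output, previous_speaker)
def pvStepA (use_new_line : Bool) (speaker_prefix speaker_suffix : String)
    (st : List String × Option String) (p : String × String) : List String × Option String :=
  let output :=
    if some p.2 ≠ st.2 then
      (if pvTruthy st.2 && use_new_line then st.1 ++ ["\n"] else st.1)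
        ++ [speaker_prefix ++ p.2 ++ speaker_suffix]
    else st.1
  (output ++ [p.1], some p.2)

def create_diarized_text (word_labels : List String) (speaker_labels : List String) (use_new_line : Bool) (speaker_prefix : String) (speaker_suffix : String) : String :=
  PySem.Str.join " "
    (((word_labels.zip speaker_labels).foldl (pvStepA use_new_line speaker_prefix speaker_suffix) ([], none)).1)

-- ===== PORT B =====
-- itertools.groupby over the zipped pairs, keyed on the speaker: consecutive same-speaker runs.
def pvRuns : List (String × String) → List (String × List String)
  | [] => []
  | (w, s) :: rest =>
    (s, w :: (rest.takeWhile (fun p => p.2 == s)).map Prod.fst) ::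
      pvRuns (rest.dropWhile (fun p => p.2 == s))
termination_by l => l.length
decreasing_by
  simp only [List.length_cons]
  exact Nat.lt_succ_of_le (List.length_dropWhile_le _ _)

-- B's loop over the runs, carrying previous_speaker
def pvEmit (use_new_line : Bool) (speaker_prefix speaker_suffix : String) :
    Option String → List (String × List String) → List String
  | _, [] => []
  | prev, (s, ws) :: rest =>
    (if pvTruthy prev && use_new_line then ["\n"] else []) ++
      (speaker_prefix ++ s ++ speaker_suffix) :: ws ++
        pvEmit use_new_line speaker_prefix speaker_suffix (some s) rest

def create_diarized_text_alt (word_labels : List String) (speaker_labels : List String) (use_new_line : Bool) (speaker_prefix : String) (speaker_suffix : String) : String :=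
  PySem.Str.join " "
    (pvEmit use_new_line speaker_prefix speaker_suffix none (pvRuns (word_labels.zip speaker_labels)))

-- ===== PRECONDITION & SPEC =====
def Spec_create_diarized_text (word_labels : List String) (speaker_labels : List String) (use_new_line : Bool) (speaker_prefix : String) (speaker_suffix : String) (out : String) : Prop := out = create_diarized_text_alt word_labels speaker_labels use_new_line speaker_prefix speaker_suffix
instance (word_labels : List String) (speaker_labels : List String) (use_new_line : Bool) (speaker_prefix : String) (speaker_suffix : String) (out : String) : Decidable (Spec_create_diarized_text word_labels speaker_labels use_new_line speaker_prefix speaker_suffix out) := by unfold Spec_create_diarized_text; infer_instance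

-- ===== CLAIM (what is proved, stated in full; the proofs are below) =====
def Claim_equal_create_diarized_text : Prop := ∀ (word_labels : List String) (speaker_labels : List String) (use_new_line : Bool) (speaker_prefix : String) (speaker_suffix : String), Dom_create_diarized_text word_labels speaker_labels use_new_line speaker_prefix speaker_suffix → Spec_create_diarized_text word_labels speaker_labels use_new_line speaker_prefix speaker_suffix (create_diarized_text word_labels speaker_labels use_new_line speaker_prefix speaker_suffix)

-- ===== LEMMAS AND PROOFS =====

-- A's loop, written as a recursion producing only the suffix it appends
def pvFA (nl : Bool) (pre suf : String) : Option String → List (String × String) → List String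
  | _, [] => []
  | prev, (w, s) :: rest =>
    (if some s ≠ prev then
       (if pvTruthy prev && nl then ["\n"] else []) ++ [pre ++ s ++ suf]
     else []) ++ w :: pvFA nl pre suf (some s) rest

lemma foldl_stepA (nl : Bool) (pre suf : String) :
    ∀ (l : List (String × String)) (acc : List String) (prev : Option String),
      (l.foldl (pvStepA nl pre suf) (acc, prev)).1 = acc ++ pvFA nl pre suf prev l := by
  intro l
  induction l with
  | nil => intro acc prev; simp [pvFA]
  | cons p t ih =>
    intro acc prev
    obtain ⟨w, s⟩ := p
    simp only [List.foldl_cons, pvStepA, pvFA]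
    by_cases h : some s ≠ prev
    · simp only [h, if_true, ih, ne_eq, not_false_eq_true]
      split_ifs with h3 <;> simp
    · simp [h, ih]

lemma pvFA_sameRun (nl : Bool) (pre suf : String) (s : String) :
    ∀ (run other : List (String × String)), (∀ p ∈ run, p.2 = s) →
      pvFA nl pre suf (some s) (run ++ other)
        = run.map Prod.fst ++ pvFA nl pre suf (some s) other := by
  intro run
  induction run with
  | nil => intro other _; simp
  | cons p t ih =>
    intro other hall
    obtain ⟨w, s'⟩ := p
    have hs : s' = s := hall (w, s') (List.mem_cons_self)
    subst hs
    simp only [List.cons_append, pvFA, List.map_cons]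
    have : pvFA nl pre suf (some s') (t ++ other) = t.map Prod.fst ++ pvFA nl pre suf (some s') other :=
      ih other (fun p hp => hall p (List.mem_cons_of_mem _ hp))
    simp [this]

lemma head_dropWhile {α : Type} (p : α → Bool) :
    ∀ (l : List α) (x : α) (xs : List α), l.dropWhile p = x :: xs → p x = false := by
  intro l
  induction l with
  | nil => intro x xs h; simp [List.dropWhile] at h
  | cons a t ih =>
    intro x xs h
    by_cases hp : p a = true
    · rw [List.dropWhile_cons_of_pos hp] at h; exact ih x xs h
    · rw [List.dropWhile_cons_of_neg hp] at h
      obtain ⟨rfl, -⟩ := List.cons.inj h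
      simpa using hp

lemma pvFA_eq_pvEmit (nl : Bool) (pre suf : String) :
    ∀ (n : Nat) (l : List (String × String)) (prev : Option String), l.length ≤ n →
      (∀ w s, l.head? = some (w, s) → prev ≠ some s) →
      pvFA nl pre suf prev l = pvEmit nl pre suf prev (pvRuns l) := by
  intro n
  induction n with
  | zero =>
    intro l prev hlen _
    have : l = [] := List.eq_nil_of_length_eq_zero (Nat.le_zero.mp hlen)
    subst this; simp [pvFA, pvRuns, pvEmit]
  | succ n ih =>
    intro l prev hlen hhead
    match l with
    | [] => simp [pvFA, pvRuns, pvEmit]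
    | (w, s) :: rest =>
      have hprev : prev ≠ some s := hhead w s rfl
      have hcond : some s ≠ prev := fun h => hprev h.symm
      rw [pvRuns]
      simp only [pvFA, pvEmit, if_pos hcond]
      -- split rest into the same-speaker run and the remainder
      have hsplit : rest = rest.takeWhile (fun p => p.2 == s) ++ rest.dropWhile (fun p => p.2 == s) :=
        (List.takeWhile_append_dropWhile).symm
      have hall : ∀ p ∈ rest.takeWhile (fun p => p.2 == s), p.2 = s := by
        intro p hp
        have := List.mem_takeWhile_imp hp
        simpa using this
      have h1 : pvFA nl pre suf (some s) rest
          = (rest.takeWhile (fun p => p.2 == s)).map Prod.fst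
            ++ pvFA nl pre suf (some s) (rest.dropWhile (fun p => p.2 == s)) := by
        conv_lhs => rw [hsplit]
        exact pvFA_sameRun nl pre suf s _ _ hall
      have hlen' : (rest.dropWhile (fun p => p.2 == s)).length ≤ n := by
        have h2 : (rest.dropWhile (fun p => p.2 == s)).length ≤ rest.length :=
          List.length_dropWhile_le _ _
        have : rest.length ≤ n := by simpa using Nat.le_of_succ_le_succ hlen
        omega
      have hhead' : ∀ w' s', (rest.dropWhile (fun p => p.2 == s)).head? = some (w', s') →
          (some s : Option String) ≠ some s' := by
        intro w' s' hh heq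
        obtain ⟨x, xs, hx⟩ : ∃ x xs, rest.dropWhile (fun p => p.2 == s) = x :: xs := by
          cases hdw : rest.dropWhile (fun p => p.2 == s) with
          | nil => rw [hdw] at hh; simp at hh
          | cons x xs => exact ⟨x, xs, rfl⟩
        rw [hx] at hh
        have hfalse := head_dropWhile _ rest x xs hx
        simp at hh
        obtain ⟨rfl⟩ : x = (w', s') := by cases hh; rfl
        simp at hfalse
        exact hfalse (Option.some.inj heq).symm
      have h2 := ih (rest.dropWhile (fun p => p.2 == s)) (some s) hlen' hhead'
      rw [h1, h2]
      simp

theorem create_diarized_text_spec : Claim_equal_create_diarized_text := by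
  intro wl sl nl pre suf _
  unfold Spec_create_diarized_text create_diarized_text create_diarized_text_alt
  congr 1
  have h1 := foldl_stepA nl pre suf (wl.zip sl) [] none
  rw [h1, List.nil_append]
  exact pvFA_eq_pvEmit nl pre suf (wl.zip sl).length (wl.zip sl) none le_rfl
    (by intro w s _ h; cases h)
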